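-- pv_equiv track=rewrite | github.com/jholaj/MetroSystem | src/graph_utils.py | build_metro_graph
-- ===== SOURCE A (Python) =====
-- def build_metro_graph(lines):
--     """
--     This function builds a graph representation of a metro system.
--
--     Args:
--         lines (dict): A dictionary where keys are metro line names and values are lists of stations on that line.
--
--     Returns:
--         dict: A graph where keys are stations and values are dictionaries representing neighboring stations and the transfer time between them.
--     """
--     # Now every edge is set to 1
--     graph = {}
--     for line, stations in lines.items():
--         for i, station in enumerate(stations):
--             if station not in graph:
--                 graph[station] = {}
--             if i > 0:
--                 graph[station][stations[i-1]] = 1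
--             if i < len(stations) - 1:
--                 graph[station][stations[i+1]] = 1
--     return graph
-- ===== SOURCE B (Python) =====
-- def build_metro_graph(lines):
--     """
--     This function builds a graph representation of a metro system.
--
--     Args:
--         lines (dict): A dictionary where keys are metro line names and values are lists of stations on that line.
--
--     Returns:
--         dict: A graph where keys are stations and values are dictionaries representing neighboring stations and the transfer time between them.
--     """
--     # Node-major construction: materialise the directed edge list once,
--     # then build each station's neighbour dict by filtering it.
--     edges = [e for stations in lines.values()
--                for pair in zip(stations, stations[1:])
--                for e in (pair, pair[::-1])]
--     nodes = dict.fromkeys(s for stations in lines.values() for s in stations)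
--     return {s: dict.fromkeys((b for a, b in edges if a == s), 1) for s in nodes}
-- ===== Notes on version B (the rewrite author's own statement) =====
-- stated objective: alternative
-- what changed: B builds the graph node-major: it materialises the global directed edge list and the deduplicated station list first, then constructs each station's neighbour dict by filtering the edge list, instead of A's single streaming pass that mutates a nested dict per indexed station.
import Mathlib
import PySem

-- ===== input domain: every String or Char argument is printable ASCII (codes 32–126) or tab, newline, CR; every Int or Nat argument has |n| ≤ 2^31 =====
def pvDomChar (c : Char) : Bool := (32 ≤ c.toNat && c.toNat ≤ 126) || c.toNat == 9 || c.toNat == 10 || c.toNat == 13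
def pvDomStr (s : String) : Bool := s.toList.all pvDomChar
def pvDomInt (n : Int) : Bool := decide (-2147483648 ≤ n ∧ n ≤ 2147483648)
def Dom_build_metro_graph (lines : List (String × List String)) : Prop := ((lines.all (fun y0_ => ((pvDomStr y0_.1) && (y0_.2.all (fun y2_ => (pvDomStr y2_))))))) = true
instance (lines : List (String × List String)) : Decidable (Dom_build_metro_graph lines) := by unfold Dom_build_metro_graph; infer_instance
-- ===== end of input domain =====

-- B rebuilds the graph node-major: it materialises the global directed edge list and the
-- deduplicated station list first, then builds each station's neighbour dict by filtering
-- the edge list — a different algorithm from A's single streaming pass over indexed stations.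


-- ===== PORT A =====
-- A's loop body for one enumerated station.  'graph[station][x] = 1' is ported as
-- 'modify station empty (insert x 1)': station is always present at that point
-- (the 'not in graph' branch just above inserted it), so this is exact.
def pvStepA (stations : List String) (graph : PySem.Dict String (PySem.Dict String Int))
    (p : Int × String) : PySem.Dict String (PySem.Dict String Int) :=
  let i := p.1
  let station := p.2
  let graph := if graph.contains station then graph else graph.insert station PySem.Dict.empty
  let graph :=
    if 0 < i then
      match PySem.List.pyGet? stations (i - 1) with
      | some prev => graph.modify station PySem.Dict.empty (fun d => d.insert prev 1)
      | none => graph          -- unreachable: 0 < i < len(stations)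
    else graph
  if i < (stations.length : Int) - 1 then
    match PySem.List.pyGet? stations (i + 1) with
    | some nxt => graph.modify station PySem.Dict.empty (fun d => d.insert nxt 1)
    | none => graph            -- unreachable: i + 1 < len(stations)
  else graph

def build_metro_graph (lines : List (String × List String)) : List (String × List (String × Int)) :=
  ((lines.foldl
      (fun graph ls => (PySem.List.enumerate ls.2 0).foldl (pvStepA ls.2) graph)
      PySem.Dict.empty).items.map (fun p => (p.1, p.2.items)))

-- ===== PORT B =====
-- directed edges of one line: for each consecutive pair, the pair and its reverse
def pvLineEdges (st : List String) : List (String × String) :=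
  (st.zip (PySem.List.slice st (some 1) none)).flatMap (fun p => [p, (p.2, p.1)])

def build_metro_graph_alt (lines : List (String × List String)) : List (String × List (String × Int)) :=
  let edges := lines.flatMap (fun ls => pvLineEdges ls.2)
  let nodes := PySem.List.dedup (lines.flatMap (fun ls => ls.2))
  nodes.map (fun s =>
    (s, ((edges.filter (fun e => e.1 == s)).foldl
           (fun d p => d.insert p.2 (1 : Int)) PySem.Dict.empty).items))

-- ===== PRECONDITION & SPEC =====
def Spec_build_metro_graph (lines : List (String × List String)) (out : List (String × List (String × Int))) : Prop := out = build_metro_graph_alt lines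
instance (lines : List (String × List String)) (out : List (String × List (String × Int))) : Decidable (Spec_build_metro_graph lines out) := by unfold Spec_build_metro_graph; infer_instance

-- ===== CLAIM (what is proved, stated in full; the proofs are below) =====
def Claim_equal_build_metro_graph : Prop := ∀ (lines : List (String × List String)), Dom_build_metro_graph lines → Spec_build_metro_graph lines (build_metro_graph lines)

-- ===== LEMMAS AND PROOFS =====

-- one edge write 'graph[a][b] = 1' (a present)
def pvEdge (graph : PySem.Dict String (PySem.Dict String Int)) (a b : String) :
    PySem.Dict String (PySem.Dict String Int) :=
  graph.modify a PySem.Dict.empty (fun d => d.insert b 1)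

-- node-init pass for one line
def pvInit (g : PySem.Dict String (PySem.Dict String Int)) (st : List String) :
    PySem.Dict String (PySem.Dict String Int) :=
  st.foldl (fun g s => g.setdefault s PySem.Dict.empty) g

-- edge pass for one line (both directions per consecutive pair)
def pvEdges (g : PySem.Dict String (PySem.Dict String Int)) (st : List String) :
    PySem.Dict String (PySem.Dict String Int) :=
  (st.zip st.tail).foldl (fun g ab => pvEdge (pvEdge g ab.1 ab.2) ab.2 ab.1) g

-- structural description of A's per-line loop: carry the previous station
def pvRunA (g : PySem.Dict String (PySem.Dict String Int)) (prev : Option String) :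
    List String → PySem.Dict String (PySem.Dict String Int)
  | [] => g
  | x :: rest =>
    let g := g.setdefault x PySem.Dict.empty
    let g := match prev with
      | some p => pvEdge g x p
      | none => g
    let g := match rest with
      | r :: _ => pvEdge g x r
      | [] => g
    pvRunA g (some x) rest

theorem pvEdge_contains (g : PySem.Dict String (PySem.Dict String Int)) (a b s : String) :
    (pvEdge g a b).contains s = (s == a || g.contains s) := by
  simp [pvEdge, PySem.Dict.modify, PySem.Dict.contains_insert]

-- an edge write at a key already present commutes with any setdefault
theorem pvSetdefault_comm (g : PySem.Dict String (PySem.Dict String Int)) (k b s : String)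
    (hk : g.contains k = true) :
    (pvEdge g k b).setdefault s PySem.Dict.empty
      = pvEdge (g.setdefault s PySem.Dict.empty) k b := by
  by_cases hs : s = k
  · subst hs
    rw [PySem.Dict.setdefault_of_contains _ _ (by rw [pvEdge_contains]; simp [hk]),
        PySem.Dict.setdefault_of_contains _ _ hk]
  · by_cases hgs : g.contains s = true
    · rw [PySem.Dict.setdefault_of_contains _ _ (by rw [pvEdge_contains]; simp [hgs]),
          PySem.Dict.setdefault_of_contains _ _ hgs]
    · have hgs' : g.contains s = false := by simpa using hgs
      have hes : (pvEdge g k b).contains s = false := by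
        rw [pvEdge_contains]; simp [hgs', hs]
      rw [PySem.Dict.setdefault_of_not_contains _ _ hes,
          PySem.Dict.setdefault_of_not_contains _ _ hgs']
      apply PySem.Dict.ext
      have hins : (g.insert s PySem.Dict.empty).contains k = true := by
        rw [PySem.Dict.contains_insert]; simp [hk]
      have hgd : (g.insert s PySem.Dict.empty).getD k PySem.Dict.empty
          = g.getD k PySem.Dict.empty := by
        rw [PySem.Dict.getD_insert, if_neg (fun h : k = s => hs h.symm)]
      simp only [pvEdge, PySem.Dict.modify, hgd]
      rw [PySem.Dict.items_insert_of_not_contains _ _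
            (by simpa [PySem.Dict.modify] using hes),
          PySem.Dict.items_insert_of_contains _ _ hk,
          PySem.Dict.items_insert_of_contains _ _ hins,
          PySem.Dict.items_insert_of_not_contains _ _ hgs']
      simp [List.map_append, fun h : s = k => hs h]

theorem pvSetdefault_contains (g : PySem.Dict String (PySem.Dict String Int)) (s k : String)
    (hk : g.contains k = true) : (g.setdefault s PySem.Dict.empty).contains k = true := by
  unfold PySem.Dict.setdefault
  split
  · exact hk
  · simp only [PySem.Dict.contains] at hk ⊢
    simp [List.any_append, hk]

theorem pvInit_comm (st : List String) :
    ∀ (g : PySem.Dict String (PySem.Dict String Int)) (k b : String),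
      g.contains k = true → pvInit (pvEdge g k b) st = pvEdge (pvInit g st) k b := by
  induction st with
  | nil => intro g k b _; rfl
  | cons s st ih =>
      intro g k b hk
      simp only [pvInit, List.foldl_cons]
      rw [pvSetdefault_comm g k b s hk]
      exact ih _ k b (pvSetdefault_contains g s k hk)

theorem pvRunA_some (st : List String) :
    ∀ (g : PySem.Dict String (PySem.Dict String Int)) (p : String),
      pvRunA g (some p) st
        = (match st with
           | [] => g
           | x :: _ => pvEdges (pvEdge (pvInit g st) x p) st) := by
  induction st with
  | nil => intro g p; rfl
  | cons x rest ih =>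
      intro g p
      match rest with
      | [] =>
          show pvEdge (g.setdefault x PySem.Dict.empty) x p
              = pvEdges (pvEdge (pvInit g [x]) x p) [x]
          rfl
      | r :: rs =>
          show pvRunA (pvEdge (pvEdge (g.setdefault x PySem.Dict.empty) x p) x r) (some x) (r :: rs)
              = pvEdges (pvEdge (pvInit g (x :: r :: rs)) x p) (x :: r :: rs)
          rw [ih]
          have hx : (g.setdefault x PySem.Dict.empty).contains x = true := by
            unfold PySem.Dict.setdefault
            split
            · assumption
            · simp [PySem.Dict.contains]
          have h1 : pvInit (pvEdge (pvEdge (g.setdefault x PySem.Dict.empty) x p) x r) (r :: rs)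
              = pvEdge (pvEdge (pvInit (g.setdefault x PySem.Dict.empty) (r :: rs)) x p) x r := by
            rw [pvInit_comm _ _ x r (by rw [pvEdge_contains]; simp [hx]),
                pvInit_comm _ _ x p hx]
          show pvEdges (pvEdge (pvInit (pvEdge (pvEdge (g.setdefault x PySem.Dict.empty) x p) x r) (r :: rs)) r x) (r :: rs)
              = pvEdges (pvEdge (pvInit g (x :: r :: rs)) x p) (x :: r :: rs)
          rw [h1]
          have h2 : pvEdges (pvEdge (pvInit g (x :: r :: rs)) x p) (x :: r :: rs)
              = pvEdges (pvEdge (pvEdge (pvEdge (pvInit g (x :: r :: rs)) x p) x r) r x) (r :: rs) := by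
            rfl
          rw [h2]
          rfl

theorem pvRunA_none (st : List String) (g : PySem.Dict String (PySem.Dict String Int)) :
    pvRunA g none st = pvEdges (pvInit g st) st := by
  match st with
  | [] => rfl
  | [x] => rfl
  | x :: r :: rs =>
      show pvRunA (pvEdge (g.setdefault x PySem.Dict.empty) x r) (some x) (r :: rs)
          = pvEdges (pvInit g (x :: r :: rs)) (x :: r :: rs)
      rw [pvRunA_some]
      have hx : (g.setdefault x PySem.Dict.empty).contains x = true := by
        unfold PySem.Dict.setdefault
        split
        · assumption
        · simp [PySem.Dict.contains]
      show pvEdges (pvEdge (pvInit (pvEdge (g.setdefault x PySem.Dict.empty) x r) (r :: rs)) r x) (r :: rs)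
          = pvEdges (pvInit g (x :: r :: rs)) (x :: r :: rs)
      rw [pvInit_comm _ _ x r hx]
      rfl

theorem pvSetdefault_eq (g : PySem.Dict String (PySem.Dict String Int)) (x : String) :
    (if g.contains x then g else g.insert x PySem.Dict.empty)
      = g.setdefault x PySem.Dict.empty := by
  unfold PySem.Dict.setdefault PySem.Dict.insert
  split <;> simp_all

theorem pvStepA_eq (pre rest : List String) (g : PySem.Dict String (PySem.Dict String Int)) (x : String) :
    pvStepA (pre ++ x :: rest) g ((pre.length : Int), x)
      = (let g := g.setdefault x PySem.Dict.empty
         let g := match pre.getLast? with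
           | some p => pvEdge g x p
           | none => g
         match rest with
         | r :: _ => pvEdge g x r
         | [] => g) := by
  simp only [pvStepA, pvSetdefault_eq, pvEdge]
  rcases List.eq_nil_or_concat pre with rfl | ⟨p', p, rfl⟩
  · match rest with
    | [] => norm_num
    | r :: rs =>
        have h1 : PySem.List.pyGet? (x :: r :: rs) ((0:Int) + 1) = some r := by
          simp [PySem.List.pyGet?, PySem.List.pyIdx?]
        norm_num [h1]
  · simp only [List.concat_eq_append]
    have hlast : (p' ++ [p]).getLast? = some p := by simp
    have hpos : (0:Int) < ((p' ++ [p]).length : Int) := by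
      simp only [List.length_append, List.length_cons, List.length_nil]; push_cast; omega
    have hprev : PySem.List.pyGet? ((p' ++ [p]) ++ x :: rest) (((p' ++ [p]).length : Int) - 1)
        = some p := by
      have e1 : (p' ++ [p]) ++ x :: rest = p' ++ p :: x :: rest := by simp
      have e2 : (((p' ++ [p]).length : Int) - 1) = (p'.length : Int) := by
        simp only [List.length_append, List.length_cons, List.length_nil]; push_cast; omega
      rw [e1, e2, PySem.List.pyGet?_append_length]
    match rest with
    | [] =>
        have hno : ¬ (((p' ++ [p]).length : Int) < (((p' ++ [p]) ++ [x]).length : Int) - 1) := by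
          simp only [List.length_append, List.length_cons, List.length_nil]; push_cast; omega
        simp only [hlast, hprev, if_pos hpos, if_neg hno]
    | r :: rs =>
        have hyes : (((p' ++ [p]).length : Int) < (((p' ++ [p]) ++ x :: r :: rs).length : Int) - 1) := by
          simp only [List.length_append, List.length_cons, List.length_nil]; push_cast; omega
        have hnxt : PySem.List.pyGet? ((p' ++ [p]) ++ x :: r :: rs) (((p' ++ [p]).length : Int) + 1)
            = some r := by
          have e1 : (p' ++ [p]) ++ x :: r :: rs = ((p' ++ [p]) ++ [x]) ++ r :: rs := by simp
          have e2 : (((p' ++ [p]).length : Int) + 1) = ((((p' ++ [p]) ++ [x]).length : Int)) := by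
            simp only [List.length_append, List.length_cons, List.length_nil]; push_cast; omega
          rw [e1, e2, PySem.List.pyGet?_append_length]
        simp only [hlast, hprev, hnxt, if_pos hpos, if_pos hyes]

theorem pvLineA_eq (rest : List String) :
    ∀ (pre : List String) (g : PySem.Dict String (PySem.Dict String Int)),
      (PySem.List.enumerate rest ((pre.length : Nat) : Int)).foldl (pvStepA (pre ++ rest)) g
        = pvRunA g pre.getLast? rest := by
  induction rest with
  | nil => intro pre g; rfl
  | cons x rs ih =>
      intro pre g
      rw [PySem.List.enumerate_cons, List.foldl_cons, pvStepA_eq]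
      have e1 : ((pre.length : Int) + 1) = (((pre ++ [x]).length : Nat) : Int) := by
        simp only [List.length_append, List.length_cons, List.length_nil]; push_cast; omega
      have e2 : pre ++ x :: rs = (pre ++ [x]) ++ rs := by simp
      rw [e1, e2, ih (pre ++ [x])]
      simp only [List.getLast?_concat]
      rfl

-- one whole line of A in canonical form: init pass then edge pass
theorem pvLine_total (st : List String) (g : PySem.Dict String (PySem.Dict String Int)) :
    (PySem.List.enumerate st 0).foldl (pvStepA st) g = pvEdges (pvInit g st) st := by
  have h := pvLineA_eq st [] g
  simp only [List.nil_append, List.length_nil, Nat.cast_zero] at h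
  rw [h, show ([]:List String).getLast? = none from rfl, pvRunA_none]

-- A's whole fold in canonical form
theorem pvFoldA (lines : List (String × List String)) :
    ∀ (g : PySem.Dict String (PySem.Dict String Int)),
      lines.foldl (fun graph ls => (PySem.List.enumerate ls.2 0).foldl (pvStepA ls.2) graph) g
        = lines.foldl (fun g ls => pvEdges (pvInit g ls.2) ls.2) g := by
  induction lines with
  | nil => intro g; rfl
  | cons l ls ih => intro g; simp only [List.foldl_cons]; rw [pvLine_total, ih]

-- ===== keys =====

theorem pvInit_keys (st : List String) :
    ∀ (g : PySem.Dict String (PySem.Dict String Int)),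
      (pvInit g st).keys = PySem.Set.update g.keys st := by
  induction st with
  | nil => intro g; rfl
  | cons x xs ih =>
      intro g
      have step : (g.setdefault x PySem.Dict.empty).keys = PySem.Set.add g.keys x := by
        rw [PySem.Dict.keys_setdefault, PySem.Set.add_eq_ite]
        by_cases h : g.contains x = true
        · rw [if_pos h, if_pos ((PySem.Dict.contains_iff_mem_keys g x).mp h)]
        · have h' : x ∉ g.keys := fun hm => h ((PySem.Dict.contains_iff_mem_keys g x).mpr hm)
          rw [if_neg h', if_neg (by simpa using h)]
      rw [PySem.Set.update_cons, ← step]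
      exact ih _

theorem pvInit_contains (st : List String) (g : PySem.Dict String (PySem.Dict String Int))
    (x : String) (hx : x ∈ st) : (pvInit g st).contains x = true := by
  rw [PySem.Dict.contains_iff_mem_keys, pvInit_keys]
  exact (PySem.Set.mem_update _ _ _).mpr (Or.inr hx)

theorem pvEdge_keys (g : PySem.Dict String (PySem.Dict String Int)) (a b : String)
    (ha : g.contains a = true) : (pvEdge g a b).keys = g.keys := by
  rw [pvEdge, PySem.Dict.keys_modify, PySem.Dict.keys_insert_of_contains _ _ ha]

theorem pvEdgesP_keys (ps : List (String × String)) :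
    ∀ (g : PySem.Dict String (PySem.Dict String Int)),
      (∀ p ∈ ps, g.contains p.1 = true ∧ g.contains p.2 = true) →
      ((ps.foldl (fun g ab => pvEdge (pvEdge g ab.1 ab.2) ab.2 ab.1) g).keys = g.keys) := by
  induction ps with
  | nil => intro g _; rfl
  | cons p ps ih =>
      intro g h
      have h1 := (h p (by simp)).1
      have h2 := (h p (by simp)).2
      simp only [List.foldl_cons]
      rw [ih _ (fun q hq => by
            constructor <;>
              [ (have := (h q (by simp [hq])).1); (have := (h q (by simp [hq])).2) ] <;>
              simp [pvEdge_contains, this])]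
      rw [pvEdge_keys _ _ _ (by rw [pvEdge_contains]; simp [h2]),
          pvEdge_keys _ _ _ h1]

theorem pvLine_keys (st : List String) (g : PySem.Dict String (PySem.Dict String Int)) :
    (pvEdges (pvInit g st) st).keys = PySem.Set.update g.keys st := by
  rw [pvEdges, pvEdgesP_keys _ _ (fun p hp => by
        obtain ⟨h1, h2⟩ := List.of_mem_zip hp
        exact ⟨pvInit_contains st g p.1 h1,
               pvInit_contains st g p.2 (List.mem_of_mem_tail h2)⟩),
      pvInit_keys]

-- ===== getD =====

theorem pvInit_getD (st : List String) :
    ∀ (g : PySem.Dict String (PySem.Dict String Int)) (s : String),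
      (pvInit g st).getD s PySem.Dict.empty = g.getD s PySem.Dict.empty := by
  induction st with
  | nil => intro g s; rfl
  | cons x xs ih =>
      intro g s
      have step : (g.setdefault x PySem.Dict.empty).getD s PySem.Dict.empty
          = g.getD s PySem.Dict.empty := by
        by_cases h : s = x
        · subst h; exact PySem.Dict.getD_setdefault_self g s _ _
        · rw [PySem.Dict.getD_eq_get?_getD, PySem.Dict.get?_setdefault_of_ne _ _ h,
              ← PySem.Dict.getD_eq_get?_getD]
      calc (pvInit g (x :: xs)).getD s PySem.Dict.empty
          = (pvInit (g.setdefault x PySem.Dict.empty) xs).getD s PySem.Dict.empty := rfl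
        _ = _ := by rw [ih, step]

theorem pvEdge_getD (g : PySem.Dict String (PySem.Dict String Int)) (a b s : String) :
    (pvEdge g a b).getD s PySem.Dict.empty
      = if s = a then (g.getD a PySem.Dict.empty).insert b 1 else g.getD s PySem.Dict.empty := by
  rw [pvEdge, PySem.Dict.getD_modify]

theorem pvEdgesP_getD (ps : List (String × String)) :
    ∀ (g : PySem.Dict String (PySem.Dict String Int)) (s : String),
      (ps.foldl (fun g ab => pvEdge (pvEdge g ab.1 ab.2) ab.2 ab.1) g).getD s PySem.Dict.empty
        = ((ps.flatMap (fun p => [p, (p.2, p.1)])).filter (fun e => e.1 == s)).foldl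
            (fun d p => d.insert p.2 (1 : Int)) (g.getD s PySem.Dict.empty) := by
  induction ps with
  | nil => intro g s; rfl
  | cons p ps ih =>
      intro g s
      simp only [List.foldl_cons, List.flatMap_cons, List.filter_append, List.foldl_append]
      rw [ih]
      congr 1
      rw [pvEdge_getD, pvEdge_getD, pvEdge_getD]
      by_cases ha : p.1 = s <;> by_cases hb : p.2 = s
      · simp [ha, hb]
      · have hb' : ¬ s = p.2 := fun h => hb h.symm
        simp [ha, hb, hb']
      · have ha' : ¬ s = p.1 := fun h => ha h.symm
        simp [ha, ha', hb]
      · have ha' : ¬ s = p.1 := fun h => ha h.symm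
        have hb' : ¬ s = p.2 := fun h => hb h.symm
        simp [ha, ha', hb, hb']

theorem pvLine_getD (st : List String) (g : PySem.Dict String (PySem.Dict String Int)) (s : String) :
    (pvEdges (pvInit g st) st).getD s PySem.Dict.empty
      = ((pvLineEdges st).filter (fun e => e.1 == s)).foldl
          (fun d p => d.insert p.2 (1 : Int)) (g.getD s PySem.Dict.empty) := by
  rw [pvEdges, pvEdgesP_getD, pvInit_getD, pvLineEdges, PySem.List.slice_from_one]

-- ===== whole fold =====

theorem pvFold_keys (lines : List (String × List String)) :
    ∀ (g : PySem.Dict String (PySem.Dict String Int)),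
      (lines.foldl (fun g ls => pvEdges (pvInit g ls.2) ls.2) g).keys
        = PySem.Set.update g.keys (lines.flatMap (fun ls => ls.2)) := by
  induction lines with
  | nil => intro g; rfl
  | cons l ls ih =>
      intro g
      simp only [List.foldl_cons, List.flatMap_cons, PySem.Set.update_append]
      rw [ih, pvLine_keys]

theorem pvFold_getD (lines : List (String × List String)) :
    ∀ (g : PySem.Dict String (PySem.Dict String Int)) (s : String),
      (lines.foldl (fun g ls => pvEdges (pvInit g ls.2) ls.2) g).getD s PySem.Dict.empty
        = ((lines.flatMap (fun ls => pvLineEdges ls.2)).filter (fun e => e.1 == s)).foldl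
            (fun d p => d.insert p.2 (1 : Int)) (g.getD s PySem.Dict.empty) := by
  induction lines with
  | nil => intro g s; rfl
  | cons l ls ih =>
      intro g s
      simp only [List.foldl_cons, List.flatMap_cons, List.filter_append, List.foldl_append]
      rw [ih, pvLine_getD]

-- ===== VERDICT (by name: the statement is the Claim_ definition above) =====
theorem build_metro_graph_spec : Claim_equal_build_metro_graph := by
  intro lines _
  show build_metro_graph lines = build_metro_graph_alt lines
  unfold build_metro_graph build_metro_graph_alt
  rw [pvFoldA]
  set G := lines.foldl (fun g ls => pvEdges (pvInit g ls.2) ls.2) PySem.Dict.empty with hG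
  have hkeys : G.keys = PySem.Set.ofList (lines.flatMap (fun ls => ls.2)) := by
    rw [hG, pvFold_keys]
    simp [PySem.Dict.keys_empty, PySem.Set.update_nil_left]
  have hnd : G.keys.Nodup := by rw [hkeys]; exact PySem.Set.nodup_ofList _
  rw [PySem.Dict.items_eq_map_keys G hnd PySem.Dict.empty, List.map_map, hkeys,
      PySem.List.dedup_eq_ofList]
  refine List.map_congr_left (fun s _ => ?_)
  simp only [Function.comp]
  rw [hG, pvFold_getD]
  rfl
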